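-- pv_equiv track=rewrite | github.com/carrliitos/nest | src/cli/main.py | _parse_extras
-- ===== SOURCE A (Python) =====
-- from typing import List, Optional, Sequence
--
-- def _parse_extras(extras: Sequence[str]) -> tuple[bool, bool, bool]:
--   """
--   Accepts trailing tokens: vision control waypoint
--   and turns them into booleans.
--   """
--   s = {e.lower() for e in extras}
--   vision = "vision" in s
--   control = "control" in s
--   waypoints = ("waypoint" in s) or ("waypoints" in s)
--
--   if control and not vision:
--     raise ValueError("`control` requires `vision` (click-to-go needs vision).")
--
--   return vision, control, waypoints
-- ===== SOURCE B (Python) =====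
-- from typing import List, Optional, Sequence
--
-- _BITS = {"vision": 1, "control": 2, "waypoint": 4, "waypoints": 4}
--
-- def _parse_extras(extras: Sequence[str]) -> tuple[bool, bool, bool]:
--   """Fold tokens into one integer bitmask via a lookup table, then decode the bits."""
--   mask = 0
--   for e in extras:
--     mask |= _BITS.get(e.lower(), 0)
--   if (mask & 3) == 2:
--     raise ValueError("`control` requires `vision` (click-to-go needs vision).")
--   return bool(mask & 1), bool(mask & 2), bool(mask & 4)
-- ===== Notes on version B (the rewrite author's own statement) =====
-- stated objective: alternative
-- what changed: B replaces A's set comprehension plus four membership lookups by a table-driven bitmask encoding: each token is mapped through a constant dict to a bit (waypoint/waypoints share bit 4), the bits are OR-folded into one integer, and the three booleans plus the control-without-vision check are decoded from that mask with bitwise tests.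
-- outside the precondition, e.g. on _parse_extras(['control']): A raises ValueError, B raises ValueError
import Mathlib
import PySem

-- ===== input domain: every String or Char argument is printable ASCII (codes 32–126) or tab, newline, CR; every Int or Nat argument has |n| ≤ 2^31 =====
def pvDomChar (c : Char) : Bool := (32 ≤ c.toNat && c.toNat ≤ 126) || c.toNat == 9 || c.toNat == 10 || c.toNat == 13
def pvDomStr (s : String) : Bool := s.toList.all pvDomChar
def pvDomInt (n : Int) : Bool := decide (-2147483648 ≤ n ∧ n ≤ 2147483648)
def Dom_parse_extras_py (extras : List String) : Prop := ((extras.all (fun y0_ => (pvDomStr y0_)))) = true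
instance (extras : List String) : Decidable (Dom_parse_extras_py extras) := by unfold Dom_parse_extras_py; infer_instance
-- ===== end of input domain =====

-- B replaces A's set-of-lowered-tokens + four membership lookups by a table-driven bitmask:
-- each token is mapped through a constant dict to a bit, OR-folded into one integer, and the
-- three booleans are decoded from the mask; same O(n) cost ('alternative' objective).

-- ===== PORT A =====
def parse_extras_py (extras : List String) : Bool × Bool × Bool :=
  let s : PySem.Set String := PySem.Set.ofList (extras.map PySem.Str.lower)
  let vision := PySem.Set.contains s "vision"
  let control := PySem.Set.contains s "control"
  let waypoints := PySem.Set.contains s "waypoint" || PySem.Set.contains s "waypoints"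
  -- A's 'if control and not vision: raise ValueError' fires exactly on the inputs Pre_ excludes
  (vision, control, waypoints)

-- ===== PORT B =====
-- the module constant _BITS of Source B
def pvBITS : PySem.Dict String Nat :=
  PySem.Dict.mk [("vision", 1), ("control", 2), ("waypoint", 4), ("waypoints", 4)]

def parse_extras_py_alt (extras : List String) : Bool × Bool × Bool :=
  let mask := extras.foldl (fun m e => m ||| PySem.Dict.getD pvBITS (PySem.Str.lower e) 0) 0
  -- Source B's '(mask & 3) == 2' ValueError fires exactly on the inputs Pre_ excludes
  (decide (mask &&& 1 ≠ 0), decide (mask &&& 2 ≠ 0), decide (mask &&& 4 ≠ 0))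

-- ===== PRECONDITION & SPEC =====
-- Pre_ excludes exactly the inputs where both A and B raise ValueError: lowercased 'control' present without 'vision'.
def Pre_parse_extras_py (extras : List String) : Prop :=
  "control" ∈ extras.map PySem.Str.lower → "vision" ∈ extras.map PySem.Str.lower
instance (extras : List String) : Decidable (Pre_parse_extras_py extras) := by unfold Pre_parse_extras_py; infer_instance
def pvWitness_parse_extras_py : List String := ["Vision", "control", "waypoint"]
def Spec_parse_extras_py (extras : List String) (out : Bool × Bool × Bool) : Prop := out = parse_extras_py_alt extras
instance (extras : List String) (out : Bool × Bool × Bool) : Decidable (Spec_parse_extras_py extras out) := by unfold Spec_parse_extras_py; infer_instance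

-- ===== CLAIM (what is proved, stated in full; the proofs are below) =====
def Claim_equal_parse_extras_py : Prop := ∀ (extras : List String), Dom_parse_extras_py extras → Pre_parse_extras_py extras → Spec_parse_extras_py extras (parse_extras_py extras)

-- ===== LEMMAS AND PROOFS =====

-- bitwise helpers for the mask decode
theorem pv_or_and_self (m k : Nat) (hk : 0 < k) : (m ||| k) &&& k ≠ 0 := by
  rw [Nat.and_or_distrib_right, Nat.and_self]
  have h : k ≤ m &&& k ||| k := Nat.right_le_or
  omega

theorem pv_or_and_other (m b k : Nat) (h : b &&& k = 0) : (m ||| b) &&& k = m &&& k := by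
  rw [Nat.and_or_distrib_right, h, Nat.or_zero]

-- B's OR-fold, from an arbitrary accumulator, sets each bit iff the corresponding any-test holds.
theorem pv_mask (xs : List String) (m : Nat) :
    (decide ((xs.foldl (fun m e => m ||| PySem.Dict.getD pvBITS (PySem.Str.lower e) 0) m) &&& 1 ≠ 0),
     decide ((xs.foldl (fun m e => m ||| PySem.Dict.getD pvBITS (PySem.Str.lower e) 0) m) &&& 2 ≠ 0),
     decide ((xs.foldl (fun m e => m ||| PySem.Dict.getD pvBITS (PySem.Str.lower e) 0) m) &&& 4 ≠ 0))
    = (decide (m &&& 1 ≠ 0) || xs.any (fun e => PySem.Str.lower e == "vision"),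
       decide (m &&& 2 ≠ 0) || xs.any (fun e => PySem.Str.lower e == "control"),
       decide (m &&& 4 ≠ 0) || xs.any (fun e => PySem.Str.lower e == "waypoint" || PySem.Str.lower e == "waypoints")) := by
  induction xs generalizing m with
  | nil => simp
  | cons x xs ih =>
    simp only [List.foldl_cons, List.any_cons]
    by_cases h1 : PySem.Str.lower x = "vision"
    · have hb : PySem.Dict.getD pvBITS (PySem.Str.lower x) 0 = 1 := by
        simp [pvBITS, PySem.Dict.getD, PySem.Dict.get?_mk_cons, h1]
      simp only [hb]
      rw [ih]
      simp [h1, pv_or_and_other m 1 2 (by decide), pv_or_and_other m 1 4 (by decide)]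
    · by_cases h2 : PySem.Str.lower x = "control"
      · have hb : PySem.Dict.getD pvBITS (PySem.Str.lower x) 0 = 2 := by
          simp [pvBITS, PySem.Dict.getD, PySem.Dict.get?_mk_cons, h2]
        simp only [hb]
        rw [ih]
        simp [h2, pv_or_and_self m 2 (by omega),
          pv_or_and_other m 2 1 (by decide), pv_or_and_other m 2 4 (by decide)]
      · by_cases h3 : PySem.Str.lower x = "waypoint"
        · have hb : PySem.Dict.getD pvBITS (PySem.Str.lower x) 0 = 4 := by
            simp [pvBITS, PySem.Dict.getD, PySem.Dict.get?_mk_cons, h3]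
          simp only [hb]
          rw [ih]
          simp [h3, pv_or_and_self m 4 (by omega),
            pv_or_and_other m 4 1 (by decide), pv_or_and_other m 4 2 (by decide)]
        · by_cases h4 : PySem.Str.lower x = "waypoints"
          · have hb : PySem.Dict.getD pvBITS (PySem.Str.lower x) 0 = 4 := by
              simp [pvBITS, PySem.Dict.getD, PySem.Dict.get?_mk_cons, h4]
            simp only [hb]
            rw [ih]
            simp [h4, pv_or_and_self m 4 (by omega),
              pv_or_and_other m 4 1 (by decide), pv_or_and_other m 4 2 (by decide)]
          · have hb : PySem.Dict.getD pvBITS (PySem.Str.lower x) 0 = 0 := by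
              simp [pvBITS, PySem.Dict.getD, PySem.Dict.get?,
                Ne.symm h1, Ne.symm h2, Ne.symm h3, Ne.symm h4]
            simp only [hb, Nat.or_zero]
            rw [ih]
            rw [show (PySem.Str.lower x == "vision") = false from beq_eq_false_iff_ne.mpr h1,
              show (PySem.Str.lower x == "control") = false from beq_eq_false_iff_ne.mpr h2,
              show (PySem.Str.lower x == "waypoint") = false from beq_eq_false_iff_ne.mpr h3,
              show (PySem.Str.lower x == "waypoints") = false from beq_eq_false_iff_ne.mpr h4]
            simp

-- Membership in A's set equals the any-test over the lowered tokens.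
theorem pv_set_contains (extras : List String) (t : String) :
    PySem.Set.contains (PySem.Set.ofList (extras.map PySem.Str.lower)) t
    = extras.any (fun e => PySem.Str.lower e == t) := by
  rw [Bool.eq_iff_iff]
  simp [PySem.Set.contains, PySem.Set.mem_ofList, List.any_eq_true]

-- ===== VERDICT (by name: the statement is the Claim_ definition above) =====
theorem parse_extras_py_spec : Claim_equal_parse_extras_py := by
  intro extras _ _
  unfold Spec_parse_extras_py parse_extras_py parse_extras_py_alt
  dsimp only
  rw [pv_mask extras 0]
  rw [pv_set_contains, pv_set_contains, pv_set_contains, pv_set_contains]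
  simp only [show decide ((0:Nat) &&& 1 ≠ 0) = false from rfl,
    show decide ((0:Nat) &&& 2 ≠ 0) = false from rfl,
    show decide ((0:Nat) &&& 4 ≠ 0) = false from rfl, Bool.false_or]
  refine Prod.ext rfl (Prod.ext rfl ?_)
  rw [Bool.eq_iff_iff]
  simp only [Bool.or_eq_true, List.any_eq_true]
  constructor
  · rintro (⟨x, hx, h⟩ | ⟨x, hx, h⟩)
    · exact ⟨x, hx, Or.inl h⟩
    · exact ⟨x, hx, Or.inr h⟩
  · rintro ⟨x, hx, h | h⟩
    · exact Or.inl ⟨x, hx, h⟩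
    · exact Or.inr ⟨x, hx, h⟩
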